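-- pv_equiv track=rewrite | github.com/UAdenisyu/AlgoritmsTrainings | waterpools.py | find_biggest_water_pool
-- ===== SOURCE A (Python) =====
-- def find_biggest_water_pool(base_pool: list[int]):
--   biggest_pool = 0
--   section = 0
--   left, right = 0, 1
--   while (left < right and right < len(base_pool)):
--     if (base_pool[right] == 0):
--       section += 1
--     else:
--       section_water = section * min(base_pool[left], base_pool[right])
--       if (biggest_pool < section_water):
--         biggest_pool = section_water
--       section = 0
--       left = right
--     right += 1
--
--   return biggest_pool
-- ===== SOURCE B (Python) =====
-- def find_biggest_water_pool(base_pool: list[int]):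
--     # Divide and conquer: best pool is entirely in the left half, entirely in
--     # the right half, or spans the split between the nearest walls on each side.
--     def solve(lo, hi):
--         if hi - lo < 2:
--             return 0
--         mid = (lo + hi) // 2
--         best = max(solve(lo, mid), solve(mid, hi))
--         i = next((k for k in range(mid - 1, lo - 1, -1) if base_pool[k] != 0), None)
--         j = next((k for k in range(mid, hi) if base_pool[k] != 0), None)
--         if i is not None and j is not None:
--             best = max(best, (j - i - 1) * min(base_pool[i], base_pool[j]))
--         return best
--     return solve(0, len(base_pool))
-- ===== Notes on version B (the rewrite author's own statement) =====
-- stated objective: alternative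
-- what changed: B replaces A's left-to-right two-pointer scan with a divide-and-conquer recursion: split the array at the midpoint, recurse on both halves, and combine with the single pool spanning the split (nearest nonzero wall on each side of the midpoint).
import Mathlib
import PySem

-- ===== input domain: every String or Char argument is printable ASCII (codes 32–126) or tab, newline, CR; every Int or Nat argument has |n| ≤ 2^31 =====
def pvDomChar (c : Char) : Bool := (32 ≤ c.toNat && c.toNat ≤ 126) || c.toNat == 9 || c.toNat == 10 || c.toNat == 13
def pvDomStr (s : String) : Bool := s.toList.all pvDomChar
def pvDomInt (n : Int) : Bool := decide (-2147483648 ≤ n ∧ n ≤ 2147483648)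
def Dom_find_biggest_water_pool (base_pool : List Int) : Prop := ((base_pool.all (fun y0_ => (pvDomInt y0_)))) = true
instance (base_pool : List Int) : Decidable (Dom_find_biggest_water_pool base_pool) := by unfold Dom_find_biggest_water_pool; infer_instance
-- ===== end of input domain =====

-- B replaces A's left-to-right two-pointer scan by a divide-and-conquer recursion
-- (recurse on both halves of the index interval, combine with the pool spanning the
-- split between the nearest nonzero walls on each side); objective: alternative.

-- ===== PORT A =====
-- A's while loop: state (biggest_pool, section, value at left); right walks the tail.
def pvLoopA (biggest sect lv : Int) : List Int → Int
  | [] => biggest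
  | v :: rest =>
    if v == 0 then pvLoopA biggest (sect + 1) lv rest
    else
      let section_water := sect * min lv v
      pvLoopA (if biggest < section_water then section_water else biggest) 0 v rest

def find_biggest_water_pool (base_pool : List Int) : Int :=
  match base_pool with
  | [] => 0
  | x :: rest => pvLoopA 0 0 x rest

-- ===== PORT B =====
-- Source B's recursive solve(lo, hi); the extra fuel argument only makes the
-- recursion structural (it is always large enough, so no branch depends on it).
def pvSolveB (bp : List Int) : Nat → Nat → Nat → Int
  | 0, _, _ => 0
  | f + 1, lo, hi =>
    if hi - lo < 2 then 0
    else
      let mid := (lo + hi) / 2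
      let best := max (pvSolveB bp f lo mid) (pvSolveB bp f mid hi)
      -- i = next(k for k in range(mid-1, lo-1, -1) if bp[k] != 0), scanned backwards
      match (List.range' lo (mid - lo)).reverse.find? (fun k => bp.getD k 0 != 0),
            (List.range' mid (hi - mid)).find? (fun k => bp.getD k 0 != 0) with
      | some i, some j =>
          max best (((j : Int) - (i : Int) - 1) * min (bp.getD i 0) (bp.getD j 0))
      | _, _ => best

def find_biggest_water_pool_alt (base_pool : List Int) : Int :=
  pvSolveB base_pool base_pool.length 0 base_pool.length

-- ===== PRECONDITION & SPEC =====
def Spec_find_biggest_water_pool (base_pool : List Int) (out : Int) : Prop := out = find_biggest_water_pool_alt base_pool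
instance (base_pool : List Int) (out : Int) : Decidable (Spec_find_biggest_water_pool base_pool out) := by unfold Spec_find_biggest_water_pool; infer_instance

-- ===== CLAIM (what is proved, stated in full; the proofs are below) =====
def Claim_equal_find_biggest_water_pool : Prop := ∀ (base_pool : List Int), Dom_find_biggest_water_pool base_pool → Spec_find_biggest_water_pool base_pool (find_biggest_water_pool base_pool)

-- ===== LEMMAS AND PROOFS =====

-- fold over consecutive wall pairs, previous wall carried explicitly
def pvPF (bp : List Int) (best : Int) (l : Nat) : List Nat → Int
  | [] => best
  | j :: ws =>
    let w := ((j : Int) - (l : Int) - 1) * min (bp.getD l 0) (bp.getD j 0)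
    pvPF bp (if best < w then w else best) j ws

-- canonical value on an index interval: walls = nonzero indices in [lo, lo+len)
def pvW (bp : List Int) (lo len : Nat) : List Nat :=
  (List.range' lo len).filter (fun k => bp.getD k 0 != 0)

def pvG (bp : List Int) (lo len : Nat) : Int :=
  match pvW bp lo len with
  | [] => 0
  | a :: t => pvPF bp 0 a t

theorem pvPF_cons (bp : List Int) (best : Int) (l j : Nat) (ws : List Nat) :
    pvPF bp best l (j :: ws)
      = pvPF bp (max best (((j : Int) - (l : Int) - 1) * min (bp.getD l 0) (bp.getD j 0))) j ws := by
  show pvPF bp (if best < _ then _ else best) j ws = _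
  congr 1
  split_ifs <;> omega

theorem pvPF_le (bp : List Int) (ws : List Nat) : ∀ (best : Int) (l : Nat),
    best ≤ pvPF bp best l ws := by
  induction ws with
  | nil => intro best l; exact le_refl _
  | cons j ws ih =>
    intro best l
    rw [pvPF_cons]
    exact le_trans (le_max_left _ _) (ih _ j)

theorem pvPF_nonneg (bp : List Int) (ws : List Nat) (l : Nat) : 0 ≤ pvPF bp 0 l ws :=
  pvPF_le bp ws 0 l

theorem pvPF_max_pull (bp : List Int) (ws : List Nat) : ∀ (best : Int) (l : Nat), 0 ≤ best →
    pvPF bp best l ws = max best (pvPF bp 0 l ws) := by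
  induction ws with
  | nil => intro best l h; simp [pvPF]; omega
  | cons j ws ih =>
    intro best l h
    rw [pvPF_cons, pvPF_cons]
    have hn := pvPF_nonneg bp ws j
    rw [ih (max best (((j : Int) - (l : Int) - 1) * min (bp.getD l 0) (bp.getD j 0))) j (by omega),
        ih (max 0 (((j : Int) - (l : Int) - 1) * min (bp.getD l 0) (bp.getD j 0))) j (by omega)]
    omega

theorem pvPF_append (bp : List Int) (t1 : List Nat) : ∀ (a : Nat) (ws2 : List Nat),
    pvPF bp 0 a (t1 ++ ws2)
      = max (pvPF bp 0 a t1) (pvPF bp 0 ((a :: t1).getLast (by simp)) ws2) := by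
  induction t1 with
  | nil =>
    intro a ws2
    simp [pvPF]
    have := pvPF_nonneg bp ws2 a
    omega
  | cons b t ih =>
    intro a ws2
    have hlast : (a :: b :: t).getLast (by simp) = (b :: t).getLast (by simp) := by
      simp [List.getLast]
    rw [List.cons_append, pvPF_cons, pvPF_cons, hlast,
        pvPF_max_pull bp (t ++ ws2)
          (max 0 (((b : Int) - (a : Int) - 1) * min (bp.getD a 0) (bp.getD b 0))) b (by omega),
        pvPF_max_pull bp t
          (max 0 (((b : Int) - (a : Int) - 1) * min (bp.getD a 0) (bp.getD b 0))) b (by omega),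
        ih b ws2]
    have := pvPF_nonneg bp t b
    have := pvPF_nonneg bp ws2 ((b :: t).getLast (by simp))
    omega

-- find? from the front / back of a list, via its filter
theorem find?_eq_head_filter (p : Nat → Bool) (l : List Nat) :
    l.find? p = (l.filter p).head? := by
  induction l with
  | nil => rfl
  | cons a t ih =>
    cases hpa : p a with
    | true =>
      rw [List.find?_cons_of_pos (by simp [hpa]), List.filter_cons_of_pos (by simp [hpa]),
        List.head?_cons]
    | false =>
      rw [List.find?_cons_of_neg (by simp [hpa]), List.filter_cons_of_neg (by simp [hpa]), ih]

theorem find?_reverse_eq_getLast_filter (p : Nat → Bool) (l : List Nat) :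
    l.reverse.find? p = (l.filter p).getLast? := by
  rw [find?_eq_head_filter, List.filter_reverse, List.head?_reverse]

-- the main divide-and-conquer invariant: enough fuel gives the canonical value
theorem pvSolveB_eq (bp : List Int) : ∀ (f lo hi : Nat), hi - lo ≤ f →
    pvSolveB bp f lo hi = pvG bp lo (hi - lo) := by
  intro f
  induction f with
  | zero =>
    intro lo hi h
    have : hi - lo = 0 := by omega
    simp [pvSolveB, this, pvG, pvW]
  | succ f ih =>
    intro lo hi h
    simp only [pvSolveB]
    by_cases hsmall : hi - lo < 2
    · rw [if_pos hsmall]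
      have h01 : hi - lo = 0 ∨ hi - lo = 1 := by omega
      rcases h01 with h0 | h1
      · simp [pvG, pvW, h0]
      · rw [h1]
        by_cases hp : bp[lo]?.getD 0 = 0 <;>
          simp [pvG, pvW, List.range'_one, List.getD, hp, pvPF]
    · rw [if_neg hsmall]
      have h2 : 2 ≤ hi - lo := by omega
      set mid := (lo + hi) / 2 with hmid
      have hlo : lo < mid := by omega
      have hhi : mid < hi := by omega
      rw [ih lo mid (by omega), ih mid hi (by omega)]
      -- split the walls of [lo, hi) at mid
      have hWsplit : pvW bp lo (hi - lo) = pvW bp lo (mid - lo) ++ pvW bp mid (hi - mid) := by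
        rw [pvW, pvW, pvW, ← List.filter_append]
        congr 1
        have hr := @List.range'_append lo (mid - lo) (hi - mid) 1
        rw [show lo + 1 * (mid - lo) = mid by omega] at hr
        rw [show (hi - lo) = (mid - lo) + (hi - mid) by omega]
        exact hr.symm
      have hifind : (List.range' lo (mid - lo)).reverse.find? (fun k => bp.getD k 0 != 0)
          = (pvW bp lo (mid - lo)).getLast? := by
        rw [find?_reverse_eq_getLast_filter]; rfl
      have hjfind : (List.range' mid (hi - mid)).find? (fun k => bp.getD k 0 != 0)
          = (pvW bp mid (hi - mid)).head? := by
        rw [find?_eq_head_filter]; rfl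
      rw [hifind, hjfind]
      rcases e1 : pvW bp lo (mid - lo) with _ | ⟨a, t1⟩ <;>
        rcases e2 : pvW bp mid (hi - mid) with _ | ⟨j, t2⟩
      · -- both halves wall-free
        simp [pvG, hWsplit, e1, e2]
      · -- no wall on the left
        have hn2 : 0 ≤ pvPF bp 0 j t2 := pvPF_nonneg bp t2 j
        simp only [pvG, hWsplit, e1, e2, List.getLast?_nil, List.head?_cons, List.nil_append]
        omega
      · -- no wall on the right
        have hn1 : 0 ≤ pvPF bp 0 a t1 := pvPF_nonneg bp t1 a
        simp only [pvG, hWsplit, e1, e2, List.head?_nil, List.append_nil,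
          List.getLast?_eq_getLast_of_ne_nil (List.cons_ne_nil a t1)]
        omega
      · -- walls on both sides: the spanning pool joins last left wall to first right wall
        simp only [pvG, hWsplit, e1, e2, List.head?_cons,
          List.getLast?_eq_getLast_of_ne_nil (List.cons_ne_nil a t1), List.cons_append]
        rw [pvPF_append bp t1 a (j :: t2), pvPF_cons,
            pvPF_max_pull bp t2 _ j (le_max_left 0 _)]
        have hn1 : 0 ≤ pvPF bp 0 a t1 := pvPF_nonneg bp t1 a
        have hn2 : 0 ≤ pvPF bp 0 j t2 := pvPF_nonneg bp t2 j
        omega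

-- A's scan computed as the pair fold over the walls of the tail, implicit wall at 0
theorem pvMain (bp : List Int) (s : List Int) : ∀ (l r : Nat) (best : Int),
    s = bp.drop r →
    pvLoopA best ((r : Int) - (l : Int) - 1) (bp.getD l 0) s
      = pvPF bp best l ((List.range' r (bp.length - r)).filter (fun i => bp.getD i 0 != 0)) := by
  induction s with
  | nil =>
    intro l r best h
    have hlen : bp.length ≤ r := by
      have := congrArg List.length h; simp at this; omega
    have : bp.length - r = 0 := by omega
    simp [this, pvLoopA, pvPF]
  | cons v s' ih =>
    intro l r best h
    have hget : bp[r]? = some v := by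
      have : (bp.drop r)[0]? = some v := by rw [← h]; rfl
      simpa using this
    have hr : r < bp.length := by
      by_contra hn
      rw [List.getElem?_eq_none (by omega)] at hget; cases hget
    have hv : bp.getD r 0 = v := by simp [List.getD, hget]
    have hv' : bp[r]?.getD 0 = v := by simp [hget]
    have hs' : s' = bp.drop (r + 1) := by
      have : bp.drop (r+1) = (bp.drop r).drop 1 := by
        rw [List.drop_drop]
      rw [this, ← h]; rfl
    have hrange : bp.length - r = (bp.length - (r + 1)) + 1 := by omega
    rw [hrange, List.range'_succ]
    by_cases hz : v = 0
    · subst hz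
      simp only [pvLoopA, beq_self_eq_true, if_true]
      have harith : ((r : Int) - (l : Int) - 1) + 1 = ((r + 1 : Nat) : Int) - (l : Int) - 1 := by
        push_cast; ring
      rw [harith, ih l (r + 1) best hs', List.filter_cons_of_neg (by simp [hv'])]
    · have hbeq : (v == 0) = false := by simp [hz]
      simp only [pvLoopA, hbeq]
      rw [List.filter_cons_of_pos (by simp [hv', hz])]
      simp only [pvPF, hv]
      have harith : ((r + 1 : Nat) : Int) - (r : Int) - 1 = 0 := by push_cast; ring
      have := ih r (r + 1) (if best < ((r : Int) - (l : Int) - 1) * min (bp.getD l 0) v then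
          ((r : Int) - (l : Int) - 1) * min (bp.getD l 0) v else best) hs'
      rw [harith, hv] at this
      exact this

-- bridge: the pair fold with implicit wall 0 equals the canonical value on [0, n)
theorem pvA_eq_G (bp : List Int) (hne : bp ≠ []) :
    pvPF bp 0 0 ((List.range' 1 (bp.length - 1)).filter (fun i => bp.getD i 0 != 0))
      = pvG bp 0 bp.length := by
  have hn : 1 ≤ bp.length := List.length_pos_of_ne_nil hne
  have hr : List.range' 0 bp.length = 0 :: List.range' 1 (bp.length - 1) := by
    rw [show bp.length = (bp.length - 1) + 1 by omega, List.range'_succ]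
    norm_num
  by_cases h0 : bp.getD 0 0 = 0
  · -- index 0 is not a wall: A's first pair contributes nothing
    rw [pvG, pvW, hr, List.filter_cons_of_neg (by simpa [List.getD] using h0)]
    rcases e : (List.range' 1 (bp.length - 1)).filter (fun i => bp.getD i 0 != 0) with _ | ⟨a, t⟩
    · simp [pvPF]
    · have ha1 : 1 ≤ a := by
        have : a ∈ (List.range' 1 (bp.length - 1)).filter (fun i => bp.getD i 0 != 0) := by
          rw [e]; simp
        have := List.mem_range'.mp (List.mem_of_mem_filter this)
        omega
      rw [pvPF_cons, h0]
      congr 1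
      have hnp : ((a : Int) - (0 : Nat) - 1) * min 0 (bp.getD a 0) ≤ 0 := by
        apply mul_nonpos_of_nonneg_of_nonpos
        · have : (1 : Int) ≤ (a : Int) := by exact_mod_cast ha1
          omega
        · exact min_le_left _ _
      omega
  · -- index 0 is a wall itself
    rw [pvG, pvW, hr, List.filter_cons_of_pos (by simpa [List.getD] using h0)]

-- ===== VERDICT (by name: the statement is the Claim_ definition above) =====
theorem find_biggest_water_pool_spec : Claim_equal_find_biggest_water_pool := by
  intro bp _
  unfold Spec_find_biggest_water_pool find_biggest_water_pool_alt
  rw [pvSolveB_eq bp bp.length 0 bp.length (by omega), Nat.sub_zero]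
  cases bp with
  | nil => rfl
  | cons x rest =>
    have hA : find_biggest_water_pool (x :: rest) = pvLoopA 0 0 x rest := rfl
    rw [hA]
    have hmain := pvMain (x :: rest) rest 0 1 0 rfl
    have h1 : ((1 : Nat) : Int) - ((0 : Nat) : Int) - 1 = 0 := by norm_num
    rw [h1] at hmain
    have hgd : ((x :: rest).getD 0 0) = x := rfl
    rw [hgd] at hmain
    rw [hmain]
    exact pvA_eq_G (x :: rest) (by simp)
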